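-- pv_equiv track=rewrite | github.com/Vehmeyer/GCA-Problems | Arrays.py | isZigzag
-- ===== SOURCE A (Python) =====
-- def isZigzag(numbers):
--     res = []
--     n = 3
--
--     for i in range(len(numbers) - n+1):
--         if numbers[i] < numbers[i+1] and numbers[i+1] > numbers[i+2] or numbers[i] > numbers[i+1] and numbers[i+1] < numbers[i+2]:
--             res.append(1)
--         else:
--             res.append(0)
--
--     return res
-- ===== SOURCE B (Python) =====
-- def _sgn(p, x):
--     return 1 if x > p else (-1 if x < p else 0)
--
-- def isZigzag(numbers):
--     # Streaming state machine: carry the previous element and the sign of the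
--     # previous step; emit 1 when consecutive step signs are strictly opposite.
--     res = []
--     prev = None
--     prev_sign = None
--     for x in numbers:
--         if prev is not None:
--             s = _sgn(prev, x)
--             if prev_sign is not None:
--                 res.append(1 if prev_sign * s == -1 else 0)
--             prev_sign = s
--         prev = x
--     return res
-- ===== Notes on version B (the rewrite author's own statement) =====
-- stated objective: alternative
-- what changed: B replaces A's indexed 3-element-window scan (four comparisons per output) by a streaming state-machine fold over the elements that never indexes: it carries the previous element and the sign of the previous step, computes each adjacent comparison once, and emits 1 exactly when consecutive step signs are strictly opposite.
import Mathlib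
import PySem

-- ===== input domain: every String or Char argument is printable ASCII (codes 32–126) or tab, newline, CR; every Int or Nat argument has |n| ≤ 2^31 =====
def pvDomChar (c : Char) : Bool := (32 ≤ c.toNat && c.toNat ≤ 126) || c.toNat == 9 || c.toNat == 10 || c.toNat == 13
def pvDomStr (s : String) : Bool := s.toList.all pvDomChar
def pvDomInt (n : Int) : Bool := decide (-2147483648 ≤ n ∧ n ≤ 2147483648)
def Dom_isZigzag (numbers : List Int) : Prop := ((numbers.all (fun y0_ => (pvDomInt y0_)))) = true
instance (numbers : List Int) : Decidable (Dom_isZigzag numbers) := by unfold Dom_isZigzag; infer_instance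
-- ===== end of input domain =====

-- B replaces A's indexed three-element-window scan by a streaming state-machine fold carrying the previous element and step sign (alternative decomposition, same cost).


-- ===== PORT A =====
def isZigzag (numbers : List Int) : List Int :=
  let n : Int := 3
  (PySem.List.pyRange 0 ((numbers.length : Int) - n + 1) 1).foldl
    (fun res i =>
      if (PySem.List.pyGetD numbers i 0 < PySem.List.pyGetD numbers (i+1) 0 ∧
            PySem.List.pyGetD numbers (i+1) 0 > PySem.List.pyGetD numbers (i+2) 0) ∨
         (PySem.List.pyGetD numbers i 0 > PySem.List.pyGetD numbers (i+1) 0 ∧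
            PySem.List.pyGetD numbers (i+1) 0 < PySem.List.pyGetD numbers (i+2) 0) then
        res ++ [1]
      else
        res ++ [0]) []

-- ===== PORT B =====
-- helper _sgn of Source B
def pySgn (p x : Int) : Int := if x > p then 1 else if x < p then -1 else 0

-- loop body of Source B: state = (res, prev_sign, prev)
def zzStep (st : List Int × Option Int × Option Int) (x : Int) :
    List Int × Option Int × Option Int :=
  match st with
  | (res, prevSign, prev) =>
    match prev with
    | none => (res, prevSign, some x)
    | some p =>
      let s := pySgn p x
      match prevSign with
      | none => (res, some s, some x)
      | some ps => (res ++ [if ps * s = -1 then (1 : Int) else 0], some s, some x)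

def isZigzag_alt (numbers : List Int) : List Int :=
  (numbers.foldl zzStep ([], none, none)).1

-- ===== PRECONDITION & SPEC =====
def Spec_isZigzag (numbers : List Int) (out : List Int) : Prop := out = isZigzag_alt numbers
instance (numbers : List Int) (out : List Int) : Decidable (Spec_isZigzag numbers out) := by unfold Spec_isZigzag; infer_instance

-- ===== CLAIM (what is proved, stated in full; the proofs are below) =====
def Claim_equal_isZigzag : Prop := ∀ (numbers : List Int), Dom_isZigzag numbers → Spec_isZigzag numbers (isZigzag numbers)

-- ===== LEMMAS AND PROOFS =====

-- reference function: the zigzag marks by structural recursion on the list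
def zig : List Int → List Int
  | a :: b :: c :: t => (if (a < b ∧ b > c) ∨ (a > b ∧ b < c) then (1 : Int) else 0) :: zig (b :: c :: t)
  | _ => []

-- B's fold, once warmed up, written as structural recursion on the remaining input
def zigS (s p : Int) : List Int → List Int
  | [] => []
  | x :: t => (if s * pySgn p x = -1 then (1 : Int) else 0) :: zigS (pySgn p x) x t

theorem foldl_zzStep (t : List Int) : ∀ (res : List Int) (s p : Int),
    (t.foldl zzStep (res, some s, some p)).1 = res ++ zigS s p t := by
  induction t with
  | nil => intro res s p; simp [zigS]
  | cons x t ih =>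
    intro res s p
    simp only [List.foldl_cons, zzStep, zigS, ih, List.append_assoc, List.cons_append,
      List.nil_append]

theorem zigS_eq_zig (t : List Int) : ∀ (a b : Int), zigS (pySgn a b) b t = zig (a :: b :: t) := by
  induction t with
  | nil => intro a b; rfl
  | cons c t ih =>
    intro a b
    show (if pySgn a b * pySgn b c = -1 then (1 : Int) else 0) :: zigS (pySgn b c) c t
        = (if (a < b ∧ b > c) ∨ (a > b ∧ b < c) then (1 : Int) else 0) :: zig (b :: c :: t)
    rw [ih b c]
    congr 1
    have : (pySgn a b * pySgn b c = -1) ↔ ((a < b ∧ b > c) ∨ (a > b ∧ b < c)) := by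
      unfold pySgn
      split_ifs <;> constructor <;> intro h <;> omega
    simp only [this]

theorem alt_eq_zig (numbers : List Int) : isZigzag_alt numbers = zig numbers := by
  match numbers with
  | [] => rfl
  | [a] => rfl
  | a :: b :: t =>
    show ((a :: b :: t).foldl zzStep ([], none, none)).1 = _
    simp only [List.foldl_cons, zzStep]
    rw [foldl_zzStep]
    rw [zigS_eq_zig]
    rfl

theorem zig_length (l : List Int) : (zig l).length = l.length - 2 := by
  match l with
  | [] => rfl
  | [a] => rfl
  | [a, b] => rfl
  | a :: b :: c :: t =>
    show (zig (b :: c :: t)).length + 1 = _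
    rw [zig_length (b :: c :: t)]
    simp

theorem zig_getD (l : List Int) : ∀ (k : Nat) (h : k < (zig l).length),
    (zig l)[k] =
      if (l.getD k 0 < l.getD (k+1) 0 ∧ l.getD (k+1) 0 > l.getD (k+2) 0) ∨
         (l.getD k 0 > l.getD (k+1) 0 ∧ l.getD (k+1) 0 < l.getD (k+2) 0) then (1 : Int) else 0 := by
  match l with
  | [] => intro k h; simp [zig] at h
  | [a] => intro k h; simp [zig] at h
  | [a, b] => intro k h; simp [zig] at h
  | a :: b :: c :: t =>
    intro k h
    match k with
    | 0 => simp [zig, List.getD]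
    | Nat.succ k =>
      have h' : k < (zig (b :: c :: t)).length := by
        have h1 := zig_length (a :: b :: c :: t)
        have h2 := zig_length (b :: c :: t)
        rw [h1] at h; rw [h2]
        simp only [List.length_cons] at *
        omega
      have ih := zig_getD (b :: c :: t) k h'
      have hl : zig (a :: b :: c :: t)
          = (if (a < b ∧ b > c) ∨ (a > b ∧ b < c) then (1 : Int) else 0) :: zig (b :: c :: t) := rfl
      rw [List.getElem_of_eq hl, List.getElem_cons_succ, ih]
      simp [List.getD]

theorem a_eq_zig (numbers : List Int) : isZigzag numbers = zig numbers := by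
  unfold isZigzag
  simp only []
  rw [show (fun (res : List Int) i =>
      if (PySem.List.pyGetD numbers i 0 < PySem.List.pyGetD numbers (i+1) 0 ∧
            PySem.List.pyGetD numbers (i+1) 0 > PySem.List.pyGetD numbers (i+2) 0) ∨
         (PySem.List.pyGetD numbers i 0 > PySem.List.pyGetD numbers (i+1) 0 ∧
            PySem.List.pyGetD numbers (i+1) 0 < PySem.List.pyGetD numbers (i+2) 0) then
        res ++ [1]
      else
        res ++ [(0:Int)]) = fun res i => res ++
          [if (PySem.List.pyGetD numbers i 0 < PySem.List.pyGetD numbers (i+1) 0 ∧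
            PySem.List.pyGetD numbers (i+1) 0 > PySem.List.pyGetD numbers (i+2) 0) ∨
         (PySem.List.pyGetD numbers i 0 > PySem.List.pyGetD numbers (i+1) 0 ∧
            PySem.List.pyGetD numbers (i+1) 0 < PySem.List.pyGetD numbers (i+2) 0) then (1:Int) else 0]
      from by funext res i; split <;> rfl]
  rw [PySem.List.foldl_append_singleton_eq_map]
  rw [List.nil_append]
  apply List.ext_getElem
  · simp [PySem.List.length_pyRange_one, zig_length]
    omega
  · intro k h1 h2
    simp only [List.getElem_map, PySem.List.getElem_pyRange_one, zero_add]
    have hk : (k : Int) + 2 < (numbers.length : Int) := by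
      simp [PySem.List.length_pyRange_one] at h1; omega
    rw [zig_getD numbers k h2]
    have e0 := PySem.List.pyGetD_eq_getElem numbers (i := (k:Int)) 0 (by positivity) (by omega)
    have e1 := PySem.List.pyGetD_eq_getElem numbers (i := (k:Int)+1) 0 (by omega) (by omega)
    have e2 := PySem.List.pyGetD_eq_getElem numbers (i := (k:Int)+2) 0 (by omega) (by omega)
    rw [e0, e1, e2]
    have g0 : numbers.getD k 0 = numbers[((k:Int)).toNat]'(by omega) := by
      rw [List.getD_eq_getElem numbers 0 (by omega)]; simp
    have g1 : numbers.getD (k+1) 0 = numbers[((k:Int)+1).toNat]'(by omega) := by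
      rw [List.getD_eq_getElem numbers 0 (by omega)]; congr 1
    have g2 : numbers.getD (k+2) 0 = numbers[((k:Int)+2).toNat]'(by omega) := by
      rw [List.getD_eq_getElem numbers 0 (by omega)]; congr 1
    rw [g0, g1, g2]

-- ===== VERDICT (by name: the statement is the Claim_ definition above) =====
theorem isZigzag_spec : Claim_equal_isZigzag := by
  intro numbers _
  show isZigzag numbers = isZigzag_alt numbers
  rw [a_eq_zig, alt_eq_zig]
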